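-- pv_equiv track=rewrite | github.com/estuary-ai/mangrove | STTController.py | _remove_from
-- ===== SOURCE A (Python) =====
-- def _remove_from(lists):
--     newListOfSets = []
--     for i in range(len(lists)-1):
--         othersSet = set()
--         for other in lists[i+1:]:
--             othersSet = othersSet.union(set(other))
--         aSet = set(lists[i]).difference(othersSet)
--         newListOfSets.append(aSet)
--     newListOfSets.append(set(lists[-1]))
--     return newListOfSets
-- ===== SOURCE B (Python) =====
-- def _remove_from(lists):
--     # One backward pass: accumulate the union of all later lists incrementally.
--     out = []
--     seen = set()
--     for lst in reversed(lists):
--         out.append(set(lst) - seen)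
--         seen.update(lst)
--     out.reverse()
--     return out
-- ===== Notes on version B (the rewrite author's own statement) =====
-- stated objective: faster
-- what changed: Instead of rebuilding the union of all later lists from scratch for every index (nested loop over suffixes), B makes one backward pass that accumulates the suffix union incrementally in a single set.
import Mathlib
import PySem

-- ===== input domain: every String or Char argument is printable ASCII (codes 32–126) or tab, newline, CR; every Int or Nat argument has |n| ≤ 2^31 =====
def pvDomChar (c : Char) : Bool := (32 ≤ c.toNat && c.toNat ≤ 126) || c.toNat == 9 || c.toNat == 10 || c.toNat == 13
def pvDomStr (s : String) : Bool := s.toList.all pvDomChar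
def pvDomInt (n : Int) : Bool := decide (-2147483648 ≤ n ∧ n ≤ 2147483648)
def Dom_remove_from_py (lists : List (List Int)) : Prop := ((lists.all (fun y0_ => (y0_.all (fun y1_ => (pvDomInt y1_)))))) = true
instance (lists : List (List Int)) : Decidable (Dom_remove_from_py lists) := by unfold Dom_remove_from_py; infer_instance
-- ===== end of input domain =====

-- B replaces A's per-index rebuild of the suffix union with one incremental backward pass (asymptotically faster); A raises IndexError on [], excluded by Pre_.


-- ===== PORT A =====
-- literal transliteration of A: for each i in range(len-1) rebuild the union of all later lists, take the difference, then append set(lists[-1])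
def remove_from_py (lists : List (List Int)) : List (List Int) :=
  let newListOfSets : List (List Int) :=
    (PySem.List.pyRange 0 ((lists.length : Int) - 1) 1).foldl
      (fun acc i =>
        let othersSet : PySem.Set Int :=
          (PySem.List.slice lists (some (i + 1)) none).foldl
            (fun s other => PySem.Set.union s (PySem.Set.ofList other)) PySem.Set.empty
        let aSet : PySem.Set Int :=
          PySem.Set.diff (PySem.Set.ofList (PySem.List.pyGetD lists i [])) othersSet
        acc ++ [aSet]) []
  newListOfSets ++ [PySem.Set.ofList ((PySem.List.pyGet? lists (-1)).getD [])]

-- ===== PORT B =====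
-- literal transliteration of B: one backward pass, accumulating the suffix union incrementally
def remove_from_py_alt (lists : List (List Int)) : List (List Int) :=
  let st :=
    lists.reverse.foldl
      (fun (st : List (List Int) × PySem.Set Int) lst =>
        (st.1 ++ [PySem.Set.diff (PySem.Set.ofList lst) st.2], PySem.Set.update st.2 lst))
      ([], PySem.Set.empty)
  st.1.reverse

-- ===== PRECONDITION & SPEC =====
-- Pre_ excludes only the empty list, on which A raises IndexError (lists[-1]).
def Pre_remove_from_py (lists : List (List Int)) : Prop := lists ≠ []
instance (lists : List (List Int)) : Decidable (Pre_remove_from_py lists) := by unfold Pre_remove_from_py; infer_instance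
def pvWitness_remove_from_py : List (List Int) := [[1, 2], [2, 3]]

def Spec_remove_from_py (lists : List (List Int)) (out : List (List Int)) : Prop := out = remove_from_py_alt lists
instance (lists : List (List Int)) (out : List (List Int)) : Decidable (Spec_remove_from_py lists out) := by unfold Spec_remove_from_py; infer_instance

-- ===== CLAIM (what is proved, stated in full; the proofs are below) =====
def Claim_equal_remove_from_py : Prop := ∀ (lists : List (List Int)), Dom_remove_from_py lists → Pre_remove_from_py lists → Spec_remove_from_py lists (remove_from_py lists)

-- ===== LEMMAS AND PROOFS =====

-- canonical form: k-th output set is set(lists[k]) minus everything occurring in any later list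
def pvCanon : List (List Int) → List (List Int)
  | [] => []
  | l :: rest => PySem.Set.diff (PySem.Set.ofList l) rest.flatten :: pvCanon rest

theorem pvDiff_congr (s t t' : PySem.Set Int) (h : ∀ x, x ∈ t ↔ x ∈ t') :
    PySem.Set.diff s t = PySem.Set.diff s t' := by
  unfold PySem.Set.diff
  apply List.filter_congr
  intro x _
  simp [h x]

theorem pvDiff_nil (s : PySem.Set Int) : PySem.Set.diff s [] = s := by
  unfold PySem.Set.diff; simp

theorem pvMem_foldl_union (others : List (List Int)) (init : PySem.Set Int) (y : Int) :
    y ∈ others.foldl (fun s other => PySem.Set.union s (PySem.Set.ofList other)) init ↔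
      y ∈ init ∨ y ∈ others.flatten := by
  induction others generalizing init with
  | nil => simp
  | cons o os ih =>
    simp [List.foldl_cons, ih, PySem.Set.mem_union, PySem.Set.mem_ofList, or_assoc]

theorem pvCanon_length (lists : List (List Int)) : (pvCanon lists).length = lists.length := by
  induction lists with
  | nil => rfl
  | cons l rest ih => simp [pvCanon, ih]

theorem pvCanon_getElem (lists : List (List Int)) (k : Nat) (hk : k < lists.length) :
    (pvCanon lists)[k]'(by rw [pvCanon_length]; exact hk) =
      PySem.Set.diff (PySem.Set.ofList (lists[k]'hk)) ((lists.drop (k + 1)).flatten) := by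
  induction lists generalizing k with
  | nil => simp at hk
  | cons l rest ih =>
    cases k with
    | zero => simp [pvCanon]
    | succ k => simpa [pvCanon] using ih k (by simpa using hk)

-- B's accumulated 'seen' set: membership = occurrence in some already-seen list
theorem pvB_fold_spec (r : List (List Int)) (acc : List (List Int)) (s : PySem.Set Int) :
    (r.foldl
      (fun (st : List (List Int) × PySem.Set Int) lst =>
        (st.1 ++ [PySem.Set.diff (PySem.Set.ofList lst) st.2], PySem.Set.update st.2 lst))
      (acc, s)).1 = acc ++ (r.foldl
      (fun (st : List (List Int) × PySem.Set Int) lst =>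
        (st.1 ++ [PySem.Set.diff (PySem.Set.ofList lst) st.2], PySem.Set.update st.2 lst))
      ([], s)).1 ∧
    (∀ y, y ∈ (r.foldl
      (fun (st : List (List Int) × PySem.Set Int) lst =>
        (st.1 ++ [PySem.Set.diff (PySem.Set.ofList lst) st.2], PySem.Set.update st.2 lst))
      (acc, s)).2 ↔ y ∈ s ∨ y ∈ r.flatten) := by
  induction r generalizing acc s with
  | nil => simp
  | cons l rs ih =>
    constructor
    · simp only [List.foldl_cons]
      rw [(ih _ _).1, (ih ([] ++ [PySem.Set.diff (PySem.Set.ofList l) s]) _).1]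
      simp
    · intro y
      simp only [List.foldl_cons, (ih _ _).2 y, PySem.Set.mem_update,
        List.flatten_cons, List.mem_append]
      tauto

theorem pvB_eq_canon (lists : List (List Int)) : remove_from_py_alt lists = pvCanon lists := by
  induction lists with
  | nil => rfl
  | cons l rest ih =>
    unfold remove_from_py_alt at *
    simp only [List.reverse_cons, List.foldl_append, List.foldl_cons, List.foldl_nil]
    rw [(pvB_fold_spec _ _ _).1]
    simp only [List.reverse_append]
    have hmem := (pvB_fold_spec rest.reverse [] PySem.Set.empty).2
    simp only [List.reverse_cons]
    rw [pvDiff_congr _ _ rest.flatten (by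
      intro x
      rw [hmem x]
      simp [PySem.Set.empty, List.mem_flatten])]
    simp [pvCanon] at ih ⊢
    exact ih

theorem pvGetLast {α : Type} (xs : List α) (h : xs ≠ []) :
    PySem.List.pyGet? xs (-1) = xs[xs.length - 1]? := by
  have hl : 1 ≤ xs.length := List.length_pos_iff.mpr h
  simp only [PySem.List.pyGet?, PySem.List.pyIdx?]
  split_ifs with h1 h2 <;> simp_all

theorem pvA_eq_canon (lists : List (List Int)) (h : lists ≠ []) :
    remove_from_py lists = pvCanon lists := by
  have hlen : 1 ≤ lists.length := List.length_pos_iff.mpr h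
  unfold remove_from_py
  -- turn the foldl-append into a map over the range
  have hfold : ∀ (f : Int → List Int) (r : List Int) (acc : List (List Int)),
      r.foldl (fun acc i => acc ++ [f i]) acc = acc ++ r.map f := by
    intro f r
    induction r with
    | nil => simp
    | cons a as ih => intro acc; simp [ih]
  rw [hfold]
  simp only [List.nil_append]
  have hrlen : ((PySem.List.pyRange 0 ((lists.length : Int) - 1) 1).map
      (fun i => PySem.Set.diff (PySem.Set.ofList (PySem.List.pyGetD lists i []))
        ((PySem.List.slice lists (some (i + 1)) none).foldl
          (fun s other => PySem.Set.union s (PySem.Set.ofList other)) PySem.Set.empty))).length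
      = lists.length - 1 := by
    rw [List.length_map, PySem.List.length_pyRange_one]
    omega
  apply List.ext_getElem
  · simp only [List.length_append, hrlen, pvCanon_length, List.length_cons, List.length_nil]
    omega
  · intro k hk hk'
    rw [pvCanon_getElem lists k (by simpa [pvCanon_length] using hk')]
    have hklt : k < lists.length := by simpa [pvCanon_length] using hk'
    by_cases hlast : k < lists.length - 1
    · -- inside the loop
      rw [List.getElem_append_left (by rw [List.length_map, PySem.List.length_pyRange_one]; omega)]
      simp only [List.getElem_map, PySem.List.getElem_pyRange_one]
      · have h1 : (0 : Int) + (k : Int) = (k : Int) := by norm_num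
        rw [h1]
        have hget : PySem.List.pyGetD lists (k : Int) [] = lists[k]'hklt := by
          rw [PySem.List.pyGetD_eq_getElem lists [] (by positivity) (by exact_mod_cast hklt)]
          simp
        have hcast : ((k : Int) + 1) = ((k + 1 : Nat) : Int) := by push_cast; ring
        rw [hget, hcast, PySem.List.slice_from_natCast]
        apply pvDiff_congr
        intro x
        rw [pvMem_foldl_union]
        simp [PySem.Set.empty, List.mem_flatten]
    · -- the trailing set(lists[-1])
      have hkeq : k = lists.length - 1 := by omega
      rw [List.getElem_append_right (by rw [List.length_map, PySem.List.length_pyRange_one]; omega)]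
      have hz : k - ((PySem.List.pyRange 0 ((lists.length : Int) - 1) 1).map
          (fun i => PySem.Set.diff (PySem.Set.ofList (PySem.List.pyGetD lists i []))
            ((PySem.List.slice lists (some (i + 1)) none).foldl
              (fun s other => PySem.Set.union s (PySem.Set.ofList other)) PySem.Set.empty))).length = 0 := by
        rw [List.length_map, PySem.List.length_pyRange_one]; omega
      simp only [hz, List.getElem_cons_zero]
      have hdrop : lists.drop (k + 1) = [] := by
        apply List.drop_eq_nil_of_le; omega
      rw [hdrop]
      simp only [List.flatten_nil, pvDiff_nil]
      congr 1
      rw [pvGetLast lists h]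
      rw [List.getElem?_eq_getElem (by omega)]
      simp only [Option.getD_some]
      congr 1
      omega

-- ===== VERDICT (by name: the statement is the Claim_ definition above) =====
theorem remove_from_py_spec : Claim_equal_remove_from_py := by
  intro lists _ hpre
  unfold Spec_remove_from_py
  rw [pvA_eq_canon lists hpre, pvB_eq_canon]
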